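-- pv_equiv track=rewrite | github.com/seanpm2001/py-source-highlight | from-pygments.py | _push_pop_other
-- ===== SOURCE A (Python) =====
-- def _push_pop_other(elems):
--     push = []
--     pop = []
--     other = []
--     for elem in elems:
--         n = len(elem)
--         if n == 3 and elem[2] == "#push":
--             push.append(elem)
--         elif n == 3 and elem[2] == "#pop":
--             pop.append(elem)
--         else:
--             other.append(elem)
--     return push, pop, other
-- ===== SOURCE B (Python) =====
-- def _push_pop_other(elems):
--     def _tag(e):
--         if len(e) == 3:
--             if e[2] == "#push":
--                 return 0
--             if e[2] == "#pop":
--                 return 1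
--         return 2
--     s = sorted(elems, key=_tag)
--     tags = [_tag(e) for e in elems]
--     n0 = tags.count(0)
--     n1 = tags.count(1)
--     return s[:n0], s[n0:n0 + n1], s[n0 + n1:]
-- ===== Notes on version B (the rewrite author's own statement) =====
-- stated objective: alternative
-- what changed: Replaced the single partitioning loop with stable-sort-by-class: each element gets a class key 0/1/2 (#push/#pop/other), the list is stably sorted by that key, and the three results are slices of the sorted list at the class counts; stability preserves per-list order.
import Mathlib
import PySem

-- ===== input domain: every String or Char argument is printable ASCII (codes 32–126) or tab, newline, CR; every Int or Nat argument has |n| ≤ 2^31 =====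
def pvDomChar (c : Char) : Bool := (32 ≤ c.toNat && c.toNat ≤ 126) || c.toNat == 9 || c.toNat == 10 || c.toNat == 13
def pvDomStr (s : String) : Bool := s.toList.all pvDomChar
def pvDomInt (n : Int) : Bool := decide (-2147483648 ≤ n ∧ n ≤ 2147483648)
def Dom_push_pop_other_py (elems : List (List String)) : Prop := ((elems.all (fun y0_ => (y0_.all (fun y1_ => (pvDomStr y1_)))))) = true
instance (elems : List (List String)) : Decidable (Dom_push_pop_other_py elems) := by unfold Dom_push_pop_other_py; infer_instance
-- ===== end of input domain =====

-- B replaces A's single partitioning loop by stable-sort-by-class (key 0/1/2) followed by slicing at the class counts (alternative algorithm, not faster).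


-- ===== PORT A =====
-- One pass: fold over elems keeping the three accumulators (push, pop, other), appending as A does.
def push_pop_other_py (elems : List (List String)) : List (List String) × List (List String) × List (List String) :=
  elems.foldl (fun (acc : List (List String) × List (List String) × List (List String)) elem =>
    let n := elem.length
    if n = 3 ∧ PySem.List.pyGet? elem 2 = some "#push" then
      (acc.1 ++ [elem], acc.2.1, acc.2.2)
    else if n = 3 ∧ PySem.List.pyGet? elem 2 = some "#pop" then
      (acc.1, acc.2.1 ++ [elem], acc.2.2)
    else
      (acc.1, acc.2.1, acc.2.2 ++ [elem])) ([], [], [])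

-- ===== PORT B =====
-- B's helper _tag: class key 0 = #push, 1 = #pop, 2 = other.
def pvTag (e : List String) : Int :=
  if e.length = 3 then
    if PySem.List.pyGet? e 2 = some "#push" then 0
    else if PySem.List.pyGet? e 2 = some "#pop" then 1
    else 2
  else 2

-- B: stable sort by the class key, then slice at the class counts.
def push_pop_other_py_alt (elems : List (List String)) : List (List String) × List (List String) × List (List String) :=
  let s := PySem.List.sorted elems pvTag
  let tags := elems.map pvTag
  let n0 : Int := tags.count 0
  let n1 : Int := tags.count 1
  (PySem.List.slice s none (some n0),
   PySem.List.slice s (some n0) (some (n0 + n1)),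
   PySem.List.slice s (some (n0 + n1)) none)

-- ===== PRECONDITION & SPEC =====
def Spec_push_pop_other_py (elems : List (List String)) (out : List (List String) × List (List String) × List (List String)) : Prop := out = push_pop_other_py_alt elems
instance (elems : List (List String)) (out : List (List String) × List (List String) × List (List String)) : Decidable (Spec_push_pop_other_py elems out) := by unfold Spec_push_pop_other_py; infer_instance

-- ===== CLAIM (what is proved, stated in full; the proofs are below) =====
def Claim_equal_push_pop_other_py : Prop := ∀ (elems : List (List String)), Dom_push_pop_other_py elems → Spec_push_pop_other_py elems (push_pop_other_py elems)

-- ===== LEMMAS AND PROOFS =====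

theorem pvTag_cases (e : List String) : pvTag e = 0 ∨ pvTag e = 1 ∨ pvTag e = 2 := by
  unfold pvTag; split_ifs <;> simp

theorem pvTag_eq_zero_iff (e : List String) :
    pvTag e = 0 ↔ (e.length = 3 ∧ PySem.List.pyGet? e 2 = some "#push") := by
  unfold pvTag; split_ifs <;> simp_all

theorem pvTag_eq_one_iff (e : List String) :
    pvTag e = 1 ↔ (¬(e.length = 3 ∧ PySem.List.pyGet? e 2 = some "#push") ∧
      (e.length = 3 ∧ PySem.List.pyGet? e 2 = some "#pop")) := by
  unfold pvTag; split_ifs <;> simp_all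

theorem pvGet2 (e : List String) (h : 2 < e.length) : PySem.List.pyGet? e 2 = some e[2] := by
  rw [show (2:Int) = ((2:Nat):Int) from rfl, PySem.List.pyGet?_natCast, List.getElem?_eq_getElem h]

-- A's fold accumulates exactly the three class filters, in order.
theorem pv_fold_inv (elems : List (List String)) (p q r : List (List String)) :
    (elems.foldl (fun (acc : List (List String) × List (List String) × List (List String)) elem =>
      let n := elem.length
      if n = 3 ∧ PySem.List.pyGet? elem 2 = some "#push" then
        (acc.1 ++ [elem], acc.2.1, acc.2.2)
      else if n = 3 ∧ PySem.List.pyGet? elem 2 = some "#pop" then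
        (acc.1, acc.2.1 ++ [elem], acc.2.2)
      else
        (acc.1, acc.2.1, acc.2.2 ++ [elem])) (p, q, r)) =
    (p ++ elems.filter (fun e => pvTag e == 0),
     q ++ elems.filter (fun e => pvTag e == 1),
     r ++ elems.filter (fun e => pvTag e == 2)) := by
  induction elems generalizing p q r with
  | nil => simp
  | cons e es ih =>
    simp only [List.foldl_cons, List.filter_cons]
    by_cases h1 : e.length = 3 ∧ PySem.List.pyGet? e 2 = some "#push"
    · have t0 : pvTag e = 0 := (pvTag_eq_zero_iff e).mpr h1
      obtain ⟨hl, hp⟩ := h1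
      rw [pvGet2 e (by omega)] at hp
      simp only [Option.some.injEq] at hp
      simp [hl, hp, t0, ih]
    · by_cases h2 : e.length = 3 ∧ PySem.List.pyGet? e 2 = some "#pop"
      · have t1 : pvTag e = 1 := (pvTag_eq_one_iff e).mpr ⟨h1, h2⟩
        obtain ⟨hl, hp⟩ := h2
        rw [pvGet2 e (by omega)] at hp
        simp only [Option.some.injEq] at hp
        have hne : e[2] ≠ "#push" := by
          intro h; exact h1 ⟨hl, by rw [pvGet2 e (by omega), h]⟩
        simp [hl, hp, t1, ih]
      · have t2 : pvTag e = 2 := by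
          rcases pvTag_cases e with h | h | h
          · exact absurd ((pvTag_eq_zero_iff e).mp h) h1
          · exact absurd ((pvTag_eq_one_iff e).mp h).2 h2
          · exact h
        by_cases hl : e.length = 3
        · have hget := pvGet2 e (by omega)
          have hp1 : e[2] ≠ "#push" := fun h => h1 ⟨hl, by rw [hget, h]⟩
          have hp2 : e[2] ≠ "#pop" := fun h => h2 ⟨hl, by rw [hget, h]⟩
          simp [hl, hp1, hp2, t2, ih]
        · simp [hl, t2, ih]

theorem pv_insertBy_append (before : List String → List String → Bool) (x : List String)
    (ys zs : List (List String)) (h : ∀ y ∈ ys, before x y = false) :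
    PySem.List.insertBy before x (ys ++ zs) = ys ++ PySem.List.insertBy before x zs := by
  induction ys with
  | nil => simp
  | cons y ys ih =>
    simp only [List.cons_append, PySem.List.insertBy, h y (by simp)]
    simp only [Bool.false_eq_true, if_false, List.cons.injEq, true_and]
    exact ih (fun y hy => h y (by simp [hy]))

-- Inserting one element into a class-partitioned list appends it at the end of its class block.
theorem pv_insert_part (x : List String) (A0 A1 A2 : List (List String))
    (h0 : ∀ e ∈ A0, pvTag e = 0) (h1 : ∀ e ∈ A1, pvTag e = 1) (h2 : ∀ e ∈ A2, pvTag e = 2) :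
    PySem.List.insertBy (fun a b => decide (pvTag a < pvTag b)) x (A0 ++ A1 ++ A2) =
      if pvTag x = 0 then (A0 ++ [x]) ++ A1 ++ A2
      else if pvTag x = 1 then A0 ++ (A1 ++ [x]) ++ A2
      else A0 ++ A1 ++ (A2 ++ [x]) := by
  rcases pvTag_cases x with t | t | t
  · rw [t]
    rw [List.append_assoc, pv_insertBy_append _ _ _ _ (fun y hy => by simp [h0 y hy, t])]
    cases A1 with
    | nil =>
      cases A2 with
      | nil => simp [PySem.List.insertBy]
      | cons z zs => simp [PySem.List.insertBy, h2 z (by simp), t]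
    | cons z zs => simp [PySem.List.insertBy, h1 z (by simp), t]
  · rw [t]
    simp only [(by decide : (1:Int) ≠ 0), if_false]
    rw [List.append_assoc,
      pv_insertBy_append _ _ _ _ (fun y hy => by simp [h0 y hy, t]),
      pv_insertBy_append _ _ _ _ (fun y hy => by simp [h1 y hy, t])]
    cases A2 with
    | nil => simp [PySem.List.insertBy]
    | cons z zs => simp [PySem.List.insertBy, h2 z (by simp), t, List.append_assoc]
  · rw [t]
    simp only [(by decide : (2:Int) ≠ 0), (by decide : (2:Int) ≠ 1), if_false]
    rw [PySem.List.insertBy_of_forall_not_before]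
    · simp
    · intro y hy
      simp only [List.append_assoc, List.mem_append] at hy
      rcases hy with hy | hy | hy
      · simp [h0 y hy, t]
      · simp [h1 y hy, t]
      · simp [h2 y hy, t]

-- The insertion-sort fold on a class-partitioned accumulator produces the three class filters in order.
theorem pv_sort_fold (elems A0 A1 A2 : List (List String))
    (h0 : ∀ e ∈ A0, pvTag e = 0) (h1 : ∀ e ∈ A1, pvTag e = 1) (h2 : ∀ e ∈ A2, pvTag e = 2) :
    elems.foldl (fun acc x => PySem.List.insertBy (fun a b => decide (pvTag a < pvTag b)) x acc)
      (A0 ++ A1 ++ A2) =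
    (A0 ++ elems.filter (fun e => pvTag e == 0)) ++
    (A1 ++ elems.filter (fun e => pvTag e == 1)) ++
    (A2 ++ elems.filter (fun e => pvTag e == 2)) := by
  induction elems generalizing A0 A1 A2 with
  | nil => simp
  | cons e es ih =>
    simp only [List.foldl_cons, List.filter_cons]
    rw [pv_insert_part e A0 A1 A2 h0 h1 h2]
    rcases pvTag_cases e with t | t | t
    · have hA : ∀ y ∈ A0 ++ [e], pvTag y = 0 := by
        intro y hy
        rcases List.mem_append.mp hy with h | h
        · exact h0 y h
        · simp only [List.mem_singleton] at h; rw [h]; exact t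
      rw [if_pos t, ih (A0 ++ [e]) A1 A2 hA h1 h2]
      simp [t, List.append_assoc]
    · have hA : ∀ y ∈ A1 ++ [e], pvTag y = 1 := by
        intro y hy
        rcases List.mem_append.mp hy with h | h
        · exact h1 y h
        · simp only [List.mem_singleton] at h; rw [h]; exact t
      rw [if_neg (by rw [t]; decide), if_pos t, ih A0 (A1 ++ [e]) A2 h0 hA h2]
      simp [t, List.append_assoc]
    · have hA : ∀ y ∈ A2 ++ [e], pvTag y = 2 := by
        intro y hy
        rcases List.mem_append.mp hy with h | h
        · exact h2 y h
        · simp only [List.mem_singleton] at h; rw [h]; exact t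
      rw [if_neg (by rw [t]; decide), if_neg (by rw [t]; decide), ih A0 A1 (A2 ++ [e]) h0 h1 hA]
      simp [t, List.append_assoc]

theorem pv_sorted_eq (elems : List (List String)) :
    PySem.List.sorted elems pvTag =
      elems.filter (fun e => pvTag e == 0) ++ elems.filter (fun e => pvTag e == 1) ++
      elems.filter (fun e => pvTag e == 2) := by
  rw [PySem.List.sorted_eq_foldl_insertBy]
  have := pv_sort_fold elems [] [] [] (by simp) (by simp) (by simp)
  simpa using this

theorem pv_count_tag (elems : List (List String)) (k : Int) :
    (elems.map pvTag).count k = (elems.filter (fun e => pvTag e == k)).length := by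
  rw [List.count_eq_length_filter, List.filter_map, List.length_map]
  rfl

-- ===== VERDICT (by name: the statement is the Claim_ definition above) =====
theorem push_pop_other_py_spec : Claim_equal_push_pop_other_py := by
  intro elems _
  unfold Spec_push_pop_other_py push_pop_other_py push_pop_other_py_alt
  rw [pv_fold_inv elems [] [] []]
  set F0 := elems.filter (fun e => pvTag e == 0) with hF0
  set F1 := elems.filter (fun e => pvTag e == 1) with hF1
  set F2 := elems.filter (fun e => pvTag e == 2) with hF2
  simp only [List.nil_append]
  rw [pv_sorted_eq elems, ← hF0, ← hF1, ← hF2, pv_count_tag, pv_count_tag, ← hF0, ← hF1]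
  have e1 : PySem.List.slice (F0 ++ F1 ++ F2) none (some (F0.length : Int)) = F0 := by
    rw [PySem.List.slice_to_natCast]
    simp [List.take_append]
  have e2 : PySem.List.slice (F0 ++ F1 ++ F2) (some (F0.length : Int))
      (some ((F0.length : Int) + (F1.length : Int))) = F1 := by
    rw [PySem.List.slice_natCast_add]
    simp [List.append_assoc, List.drop_append, List.take_append]
  have e3 : PySem.List.slice (F0 ++ F1 ++ F2) (some ((F0.length : Int) + (F1.length : Int))) none = F2 := by
    have : ((F0.length : Int) + (F1.length : Int)) = ((F0.length + F1.length : Nat) : Int) := by push_cast; ring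
    rw [this, PySem.List.slice_from_natCast, show F0 ++ F1 ++ F2 = (F0 ++ F1) ++ F2 by rw [List.append_assoc],
      show F0.length + F1.length = (F0 ++ F1).length by simp, List.drop_left]
  rw [e1, e2, e3]
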